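-- pv_equiv track=rewrite | github.com/timuralp/brain-teasers | xor/xor.py | answer
-- ===== SOURCE A (Python) =====
-- def answer(start, length):
--     table = [lambda x: 0, lambda x: x-1, lambda x: 1, lambda x: x]
--
--     # compute the start/end for each line
--     xor = 0
--     for i in range(0, length):
--         line_start = start + i * length
--         line_end = line_start + length - i
--         line_xor = table[line_start%4](line_start) ^ table[line_end%4](line_end)
--         xor = xor ^ line_xor
--     return xor
-- ===== SOURCE B (Python) =====
-- def answer(start, length):
--     # Pairing argument instead of the period-4 prefix-XOR table: align each
--     # line's range to even bounds (peeling the odd endpoints into the result);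
--     # every remaining consecutive pair (2k, 2k+1) XORs to 1, so the aligned
--     # block contributes just the parity of the number of pairs.
--     xor = 0
--     for i in range(length):
--         a = start + i * length
--         b = a + length - i
--         if a % 2:
--             xor ^= a
--             a += 1
--         if (b - a) % 2:
--             b -= 1
--             xor ^= b
--         xor ^= ((b - a) // 2) & 1
--     return xor
-- ===== Notes on version B (the rewrite author's own statement) =====
-- stated objective: alternative
-- what changed: B drops the period-4 prefix-XOR lookup table and instead aligns each line's range to even endpoints (peeling odd boundary values into the result) and adds the parity of the count of consecutive (2k,2k+1) pairs, each of which XORs to 1.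
import Mathlib
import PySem

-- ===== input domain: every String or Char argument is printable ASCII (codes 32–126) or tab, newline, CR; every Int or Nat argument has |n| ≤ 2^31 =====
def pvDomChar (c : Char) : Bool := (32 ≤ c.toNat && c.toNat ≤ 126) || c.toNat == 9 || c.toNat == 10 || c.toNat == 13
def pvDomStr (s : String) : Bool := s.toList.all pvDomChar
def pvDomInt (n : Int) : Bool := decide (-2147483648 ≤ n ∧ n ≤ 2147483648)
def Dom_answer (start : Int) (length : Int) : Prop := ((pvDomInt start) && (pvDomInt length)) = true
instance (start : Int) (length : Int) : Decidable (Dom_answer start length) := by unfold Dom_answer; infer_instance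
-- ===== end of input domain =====

-- B replaces A's period-4 prefix-XOR lookup table by an even-alignment / pairing
-- computation per line (same cost, different derivation).

-- ===== PORT A =====
-- table = [lambda x: 0, lambda x: x-1, lambda x: 1, lambda x: x]
def pyTable : List (Int → Int) := [fun _ => 0, fun x => x - 1, fun _ => 1, fun x => x]

-- table[x%4](x); the index x%4 is always in [0,4), so the list lookup never raises
def tableAt (x : Int) : Int := (PySem.List.pyGetD pyTable (PySem.Int.mod x 4) (fun _ => 0)) x

def answer (start : Int) (length : Int) : Int :=
  (PySem.List.pyRange 0 length 1).foldl
    (fun xor i =>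
      let line_start := start + i * length
      let line_end := line_start + length - i
      let line_xor := PySem.Int.bxor (tableAt line_start) (tableAt line_end)
      PySem.Int.bxor xor line_xor) 0

-- ===== PORT B =====
def answer_alt (start : Int) (length : Int) : Int :=
  (PySem.List.pyRange 0 length 1).foldl
    (fun xor i =>
      let a := start + i * length
      let b := a + length - i
      -- if a % 2: xor ^= a; a += 1
      let s1 : Int × Int := if PySem.Int.mod a 2 = 1 then (PySem.Int.bxor xor a, a + 1) else (xor, a)
      -- if (b - a) % 2: b -= 1; xor ^= b
      let s2 : Int × Int := if PySem.Int.mod (b - s1.2) 2 = 1 then (PySem.Int.bxor s1.1 (b - 1), b - 1) else (s1.1, b)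
      -- xor ^= ((b - a) // 2) & 1
      PySem.Int.bxor s2.1 (PySem.Int.band (PySem.Int.floordiv (s2.2 - s1.2) 2) 1)) 0

-- ===== PRECONDITION & SPEC =====
def Spec_answer (start : Int) (length : Int) (out : Int) : Prop := out = answer_alt start length
instance (start : Int) (length : Int) (out : Int) : Decidable (Spec_answer start length out) := by unfold Spec_answer; infer_instance

-- ===== CLAIM (what is proved, stated in full; the proofs are below) =====
def Claim_equal_answer : Prop := ∀ (start : Int) (length : Int), Dom_answer start length → Spec_answer start length (answer start length)

-- ===== LEMMAS AND PROOFS =====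

-- PySem.Int.bxor agrees with Mathlib's (non-reducible) Int.xor
lemma bxor_eq_xor (a b : Int) : PySem.Int.bxor a b = Int.xor a b := by
  cases a <;> cases b <;> simp [PySem.Int.bxor, Int.xor] <;> omega

lemma bxor_assoc (a b c : Int) :
    PySem.Int.bxor (PySem.Int.bxor a b) c = PySem.Int.bxor a (PySem.Int.bxor b c) := by
  simp only [bxor_eq_xor]
  cases a <;> cases b <;> cases c <;> simp [Int.xor, Nat.xor_assoc]

lemma bxor_left_comm (a b c : Int) :
    PySem.Int.bxor a (PySem.Int.bxor b c) = PySem.Int.bxor b (PySem.Int.bxor a c) := by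
  rw [← bxor_assoc, PySem.Int.bxor_comm a b, bxor_assoc]

lemma nat_even_xor (m : Nat) : 2 * m ^^^ (2 * m + 1) = 1 := by
  apply Nat.eq_of_testBit_eq
  intro i
  cases i with
  | zero => simp
  | succ j =>
    rw [Nat.testBit_succ, Nat.xor_div_two]
    simp [Nat.mul_add_div, Nat.testBit_succ]

-- for every integer t:  (2t) xor (2t+1) = 1
lemma even_xor (t : Int) : PySem.Int.bxor (2 * t) (2 * t + 1) = 1 := by
  by_cases ht : 0 ≤ t
  · have h1 : (2 * t).toNat = 2 * t.toNat := by omega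
    have h2 : (2 * t + 1).toNat = 2 * t.toNat + 1 := by omega
    simp only [PySem.Int.bxor, if_pos (by omega : (0:Int) ≤ 2 * t),
      if_pos (by omega : (0:Int) ≤ 2 * t + 1), h1, h2, nat_even_xor]
    rfl
  · have h1 : (-(2 * t) - 1).toNat = 2 * (-t - 1).toNat + 1 := by omega
    have h2 : (-(2 * t + 1) - 1).toNat = 2 * (-t - 1).toNat := by omega
    simp only [PySem.Int.bxor, if_neg (by omega : ¬ (0:Int) ≤ 2 * t),
      if_neg (by omega : ¬ (0:Int) ≤ 2 * t + 1), h1, h2]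
    rw [Nat.xor_comm, nat_even_xor]; rfl

-- compute Python's a % m from a decomposition a = m*q + u
lemma pymod_eq (a m q u : Int) (hm : 0 < m) (hu0 : 0 ≤ u) (hum : u < m) (h : a = m * q + u) :
    PySem.Int.mod a m = u := by
  have hfd : PySem.Int.floordiv a m = q :=
    (PySem.Int.floordiv_eq_iff_of_pos hm).mpr ⟨by nlinarith, by nlinarith⟩
  have := PySem.Int.floordiv_mul_add_mod a m
  nlinarith [this]

-- compute Python's a // 2 from a decomposition
lemma pyfdiv2_eq (a q : Int) (h0 : 2 * q ≤ a) (h1 : a < 2 * q + 2) :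
    PySem.Int.floordiv a 2 = q :=
  (PySem.Int.floordiv_eq_iff_of_pos (by norm_num)).mpr ⟨by omega, by omega⟩

-- evaluate the table lookup once the residue is known
lemma tableAt_of_mod (x r : Int) (h : PySem.Int.mod x 4 = r) :
    tableAt x = (if r = 0 then 0 else if r = 1 then x - 1 else if r = 2 then 1 else x) := by
  have h0 : 0 ≤ r := h ▸ PySem.Int.mod_nonneg x (by norm_num)
  have h4 : r < 4 := h ▸ PySem.Int.mod_lt x (by norm_num)
  unfold tableAt pyTable
  rw [h]
  interval_cases r <;> simp [PySem.List.pyGetD, PySem.List.pyGet?, PySem.List.pyIdx?]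

-- the prefix-XOR step:  tableAt s XOR s = tableAt (s+1)
lemma table_step (s : Int) : PySem.Int.bxor (tableAt s) s = tableAt (s + 1) := by
  have h04 : (0:Int) < 4 := by norm_num
  have hr0 : 0 ≤ PySem.Int.mod s 4 := PySem.Int.mod_nonneg s h04
  have hr4 : PySem.Int.mod s 4 < 4 := PySem.Int.mod_lt s h04
  have hdecomp := PySem.Int.floordiv_mul_add_mod s 4
  set q := PySem.Int.floordiv s 4 with hq
  set r := PySem.Int.mod s 4 with hr
  interval_cases r
  · -- s = 4q: 0 xor s = s
    rw [tableAt_of_mod s 0 hr.symm, tableAt_of_mod (s + 1) 1 (pymod_eq _ 4 q 1 (by norm_num) (by omega) (by omega) (by omega))]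
    simp [PySem.Int.bxor_comm]
  · -- s = 4q+1: (s-1) xor s = 1
    rw [tableAt_of_mod s 1 hr.symm, tableAt_of_mod (s + 1) 2 (pymod_eq _ 4 q 2 (by norm_num) (by omega) (by omega) (by omega))]
    have h1 : s - 1 = 2 * (2 * q) := by omega
    have h2 : s = 2 * (2 * q) + 1 := by omega
    norm_num
    rw [h1, h2]; exact even_xor (2 * q)
  · -- s = 4q+2: 1 xor s = s+1
    rw [tableAt_of_mod s 2 hr.symm, tableAt_of_mod (s + 1) 3 (pymod_eq _ 4 q 3 (by norm_num) (by omega) (by omega) (by omega))]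
    have h1 : s = 2 * (2 * q + 1) := by omega
    norm_num
    calc PySem.Int.bxor 1 s
        = PySem.Int.bxor (PySem.Int.bxor s (s + 1)) s := by
          rw [h1, even_xor (2 * q + 1)]
      _ = PySem.Int.bxor (PySem.Int.bxor (s + 1) s) s := by rw [PySem.Int.bxor_comm s (s + 1)]
      _ = PySem.Int.bxor (s + 1) (PySem.Int.bxor s s) := bxor_assoc _ _ _
      _ = s + 1 := by simp
  · -- s = 4q+3: s xor s = 0
    rw [tableAt_of_mod s 3 hr.symm, tableAt_of_mod (s + 1) 0 (pymod_eq _ 4 (q + 1) 0 (by norm_num) (by omega) (by omega) (by omega))]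
    simp

-- the step read backwards:  tableAt s = tableAt (s+1) XOR s
lemma table_unstep (s : Int) : tableAt s = PySem.Int.bxor (tableAt (s + 1)) s := by
  rw [← table_step s, bxor_assoc]
  simp

-- core of B: for even a ≤ even b, the parity of the pair count (b-a)/2 equals
-- the prefix-XOR difference tableAt a XOR tableAt b
lemma even_core (a b : Int) (_hab : a ≤ b)
    (ha : PySem.Int.mod a 2 = 0) (hb : PySem.Int.mod b 2 = 0) :
    PySem.Int.band (PySem.Int.floordiv (b - a) 2) 1 = PySem.Int.bxor (tableAt a) (tableAt b) := by
  rw [PySem.Int.band_one]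
  have ha2 : (2:Int) ∣ a := (PySem.Int.mod_eq_zero_iff_dvd a 2).mp ha
  have hb2 : (2:Int) ∣ b := (PySem.Int.mod_eq_zero_iff_dvd b 2).mp hb
  obtain ⟨a2, ha2⟩ := ha2
  obtain ⟨b2, hb2⟩ := hb2
  have hra0 : 0 ≤ PySem.Int.mod a 4 := PySem.Int.mod_nonneg a (by norm_num)
  have hra4 : PySem.Int.mod a 4 < 4 := PySem.Int.mod_lt a (by norm_num)
  have hdeca := PySem.Int.floordiv_mul_add_mod a 4
  have hrb0 : 0 ≤ PySem.Int.mod b 4 := PySem.Int.mod_nonneg b (by norm_num)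
  have hrb4 : PySem.Int.mod b 4 < 4 := PySem.Int.mod_lt b (by norm_num)
  have hdecb := PySem.Int.floordiv_mul_add_mod b 4
  set qa := PySem.Int.floordiv a 4 with hqa
  set ra := PySem.Int.mod a 4 with hhra
  set qb := PySem.Int.floordiv b 4 with hqb
  set rb := PySem.Int.mod b 4 with hhrb
  have hra : ra = 0 ∨ ra = 2 := by omega
  have hrb : rb = 0 ∨ rb = 2 := by omega
  rcases hra with hra | hra <;> rcases hrb with hrb | hrb <;>
    rw [tableAt_of_mod a ra hhra.symm, tableAt_of_mod b rb hhrb.symm, hra, hrb]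
  · -- a ≡ 0, b ≡ 0 (mod 4): pair count even, 0 xor 0 = 0
    rw [pyfdiv2_eq (b - a) (2 * (qb - qa)) (by omega) (by omega),
      pymod_eq (2 * (qb - qa)) 2 (qb - qa) 0 (by norm_num) (by omega) (by omega) (by omega)]
    norm_num
  · -- a ≡ 0, b ≡ 2: pair count odd, 0 xor 1 = 1
    rw [pyfdiv2_eq (b - a) (2 * (qb - qa) + 1) (by omega) (by omega),
      pymod_eq (2 * (qb - qa) + 1) 2 (qb - qa) 1 (by norm_num) (by omega) (by omega) (by omega)]
    norm_num
    rw [PySem.Int.bxor_comm]; simp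
  · -- a ≡ 2, b ≡ 0: pair count odd, 1 xor 0 = 1
    rw [pyfdiv2_eq (b - a) (2 * (qb - qa) - 1) (by omega) (by omega),
      pymod_eq (2 * (qb - qa) - 1) 2 (qb - qa - 1) 1 (by norm_num) (by omega) (by omega) (by omega)]
    norm_num
  · -- a ≡ 2, b ≡ 2: pair count even, 1 xor 1 = 0
    rw [pyfdiv2_eq (b - a) (2 * (qb - qa)) (by omega) (by omega),
      pymod_eq (2 * (qb - qa)) 2 (qb - qa) 0 (by norm_num) (by omega) (by omega) (by omega)]
    norm_num

-- mod 2 is 0 or 1, and each case determines the parity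
lemma mod2_cases (x : Int) : PySem.Int.mod x 2 = 0 ∨ PySem.Int.mod x 2 = 1 := by
  have h0 := PySem.Int.mod_nonneg x (by norm_num : (0:Int) < 2)
  have h2 := PySem.Int.mod_lt x (by norm_num : (0:Int) < 2)
  omega

lemma mod2_odd (x : Int) (h : PySem.Int.mod x 2 = 1) : ∃ t, x = 2 * t + 1 := by
  have := PySem.Int.floordiv_mul_add_mod x 2
  exact ⟨PySem.Int.floordiv x 2, by omega⟩

lemma mod2_even (x : Int) (h : PySem.Int.mod x 2 = 0) : ∃ t, x = 2 * t := by
  have := PySem.Int.floordiv_mul_add_mod x 2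
  exact ⟨PySem.Int.floordiv x 2, by omega⟩

-- one line of B equals one line of A (for a non-empty line a < b)
lemma line_eq (acc a b : Int) (hab : a < b) :
    (let s1 : Int × Int := if PySem.Int.mod a 2 = 1 then (PySem.Int.bxor acc a, a + 1) else (acc, a);
     let s2 : Int × Int := if PySem.Int.mod (b - s1.2) 2 = 1 then (PySem.Int.bxor s1.1 (b - 1), b - 1) else (s1.1, b);
     PySem.Int.bxor s2.1 (PySem.Int.band (PySem.Int.floordiv (s2.2 - s1.2) 2) 1))
      = PySem.Int.bxor acc (PySem.Int.bxor (tableAt a) (tableAt b)) := by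
  have hA : tableAt a = PySem.Int.bxor (tableAt (a + 1)) a := table_unstep a
  have hB : tableAt b = PySem.Int.bxor (tableAt (b - 1)) (b - 1) := by
    have h := table_step (b - 1)
    rw [show b - 1 + 1 = b by ring] at h
    exact h.symm
  rcases mod2_cases a with hpa | hpa
  · -- a even: nothing peeled at the left end
    obtain ⟨ta, hta⟩ := mod2_even a hpa
    rw [if_neg (show ¬ PySem.Int.mod a 2 = 1 by omega)]
    simp only []
    rcases mod2_cases (b - a) with hpb | hpb
    · -- b - a even, so b even: no peeling at all
      obtain ⟨tb, htb⟩ := mod2_even (b - a) hpb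
      rw [if_neg (show ¬ PySem.Int.mod (b - a) 2 = 1 by omega)]
      simp only []
      exact congrArg _ (even_core a b (by omega) hpa
        (pymod_eq b 2 (ta + tb) 0 (by norm_num) (by omega) (by omega) (by omega)))
    · -- b - a odd, so b odd: peel b-1
      obtain ⟨tb, htb⟩ := mod2_odd (b - a) hpb
      rw [if_pos (show PySem.Int.mod (b - a) 2 = 1 from hpb)]
      simp only []
      rw [even_core a (b - 1) (by omega) hpa
          (pymod_eq (b - 1) 2 (ta + tb) 0 (by norm_num) (by omega) (by omega) (by omega)),
        hB]
      simp only [bxor_left_comm, PySem.Int.bxor_comm]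
  · -- a odd: peel a, continue from a+1
    obtain ⟨ta, hta⟩ := mod2_odd a hpa
    rw [if_pos hpa]
    simp only []
    have ha1 : PySem.Int.mod (a + 1) 2 = 0 :=
      pymod_eq (a + 1) 2 (ta + 1) 0 (by norm_num) (by omega) (by omega) (by omega)
    rcases mod2_cases (b - (a + 1)) with hpb | hpb
    · -- b even
      obtain ⟨tb, htb⟩ := mod2_even (b - (a + 1)) hpb
      rw [if_neg (show ¬ PySem.Int.mod (b - (a + 1)) 2 = 1 by omega)]
      simp only []
      rw [even_core (a + 1) b (by omega) ha1
          (pymod_eq b 2 (ta + 1 + tb) 0 (by norm_num) (by omega) (by omega) (by omega)),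
        hA]
      simp only [bxor_left_comm, PySem.Int.bxor_comm]
    · -- b odd: peel b-1 as well
      obtain ⟨tb, htb⟩ := mod2_odd (b - (a + 1)) hpb
      rw [if_pos (show PySem.Int.mod (b - (a + 1)) 2 = 1 from hpb)]
      simp only []
      rw [even_core (a + 1) (b - 1) (by omega) ha1
          (pymod_eq (b - 1) 2 (ta + 1 + tb) 0 (by norm_num) (by omega) (by omega) (by omega)),
        hA, hB]
      simp only [bxor_left_comm, PySem.Int.bxor_comm]

-- ===== VERDICT (by name: the statement is the Claim_ definition above) =====
theorem answer_spec : Claim_equal_answer := by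
  intro start length _
  unfold Spec_answer answer answer_alt
  apply PySem.List.foldl_congr_mem
  intro acc i hi
  have hmem := (PySem.List.mem_pyRange_one).mp hi
  simp only []
  exact (line_eq acc (start + i * length) (start + i * length + length - i) (by omega)).symm
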